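-- pv_equiv track=rewrite | github.com/DaviCMachado/T1_comunicacao | encode.py | nrzi
-- ===== SOURCE A (Python) =====
-- def nrzi(bits):
--     tempo, sinal = [], []
--
--     if not bits:
--         return tempo, sinal
--
--     nivel = -1 if bits[0] == '0' else 1
--
--     t = 0
--     for i, bit in enumerate(bits):
--         if i > 0 and bit == '1':
--             nivel *= -1  # Inverte nível no bit '1', exceto no primeiro bit
--         tempo += [t, t + 1]
--         sinal += [nivel] * 2
--         t += 1
--     return tempo, sinal
-- ===== SOURCE B (Python) =====
-- def nrzi(bits):
--     n = len(bits)
--     if n == 0: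
--         return [], []
--     base = -1 if bits[0] == '0' else 1
--     # prefix counts of '1's over bits[1:], running count
--     counts = []
--     c = 0
--     for ch in bits[1:]:
--         if ch == '1':
--             c += 1
--         counts.append(c)
--     levels = [base] + [base * (1 if c % 2 == 0 else -1) for c in counts]
--     tempo = [x for i in range(n) for x in (i, i + 1)]
--     sinal = [lvl for lvl in levels for _ in range(2)]
--     return tempo, sinal
-- ===== Notes on version B (the rewrite author's own statement) =====
-- stated objective: alternative
-- what changed: Replaces the single interleaved loop with a running sign by a prefix-count-of-ones table whose parity determines each level, plus separate comprehensions that build tempo and the doubled sinal.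
import Mathlib
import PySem

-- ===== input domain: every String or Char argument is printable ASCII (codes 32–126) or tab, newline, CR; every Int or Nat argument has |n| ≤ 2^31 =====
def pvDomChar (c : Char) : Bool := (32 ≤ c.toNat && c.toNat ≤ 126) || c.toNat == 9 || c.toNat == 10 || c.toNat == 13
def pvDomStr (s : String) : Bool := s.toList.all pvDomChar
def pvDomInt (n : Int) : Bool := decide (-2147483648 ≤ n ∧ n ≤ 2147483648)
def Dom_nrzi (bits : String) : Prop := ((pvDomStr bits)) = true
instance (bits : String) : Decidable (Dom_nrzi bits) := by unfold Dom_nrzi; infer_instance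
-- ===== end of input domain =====

-- B replaces A's single interleaved loop (running sign flipped in place) by a prefix
-- count-of-ones table whose parity fixes each level, plus separate passes building
-- tempo and the doubled sinal (objective: alternative decomposition, same cost).

-- ===== PORT A =====
-- the for-loop over enumerate(bits): state (i, nivel, t, tempo, sinal)
def nrziLoop : List Char → Nat → Int → Int → List Int → List Int → List Int × List Int
  | [], _, _, _, tempo, sinal => (tempo, sinal)
  | bit :: rest, i, nivel, t, tempo, sinal =>
    let nivel' := if 0 < i ∧ bit = '1' then -nivel else nivel
    nrziLoop rest (i + 1) nivel' (t + 1) (tempo ++ [t, t + 1]) (sinal ++ [nivel', nivel'])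

def nrzi (bits : String) : List Int × List Int :=
  let l := bits.toList
  if l.isEmpty then ([], [])
  else
    let nivel : Int := if l.headD ' ' = '0' then -1 else 1
    nrziLoop l 0 nivel 0 [] []

-- ===== PORT B =====
-- running count of '1's over bits[1:] (the appending loop of Source B)
def altCounts : List Char → Nat → List Nat
  | [], _ => []
  | ch :: rest, c =>
    let c' := if ch = '1' then c + 1 else c
    c' :: altCounts rest c'

def nrzi_alt (bits : String) : List Int × List Int :=
  let l := bits.toList
  let n := l.length
  if n = 0 then ([], [])
  else
    let base : Int := if l.headD ' ' = '0' then -1 else 1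
    let counts := altCounts (l.drop 1) 0
    let levels := base :: counts.map (fun c => base * (if c % 2 = 0 then 1 else -1))
    let tempo := (List.range n).flatMap (fun i : Nat => [(i : Int), (i : Int) + 1])
    let sinal := levels.flatMap (fun lvl => [lvl, lvl])
    (tempo, sinal)

-- ===== PRECONDITION & SPEC =====
def Spec_nrzi (bits : String) (out : List Int × List Int) : Prop := out = nrzi_alt bits
instance (bits : String) (out : List Int × List Int) : Decidable (Spec_nrzi bits out) := by unfold Spec_nrzi; infer_instance

-- ===== CLAIM (what is proved, stated in full; the proofs are below) =====
def Claim_equal_nrzi : Prop := ∀ (bits : String), Dom_nrzi bits → Spec_nrzi bits (nrzi bits)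

-- ===== LEMMAS AND PROOFS =====

-- the level of a prefix with c ones, for a given base
def pvLvl (base : Int) (c : Nat) : Int := base * (if c % 2 = 0 then 1 else -1)

theorem pvLvl_succ (base : Int) (c : Nat) : pvLvl base (c + 1) = -pvLvl base c := by
  unfold pvLvl
  rcases Nat.even_or_odd c with h | h
  · have h0 : c % 2 = 0 := Nat.even_iff.mp h
    have h1 : (c + 1) % 2 = 1 := by omega
    simp [h0, h1]
  · have h0 : c % 2 = 1 := Nat.odd_iff.mp h
    have h1 : (c + 1) % 2 = 0 := by omega
    simp [h0, h1]

theorem range_flatMap_shift (n : Nat) (t : Int) :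
    (List.range (n + 1)).flatMap (fun k : Nat => [t + k, t + k + 1]) =
      [t, t + 1] ++ (List.range n).flatMap (fun k : Nat => [t + 1 + k, t + 1 + k + 1]) := by
  rw [List.range_succ_eq_map]
  simp only [List.flatMap_cons, List.flatMap_map]
  congr 1
  · push_cast; ring_nf
  · congr 1
    funext k
    push_cast
    ring_nf

theorem altCounts_cons (ch : Char) (rest : List Char) (c : Nat) :
    altCounts (ch :: rest) c =
      (if ch = '1' then c + 1 else c) :: altCounts rest (if ch = '1' then c + 1 else c) := rfl

theorem nrziLoop_spec (cs : List Char) : ∀ (j : Nat) (t : Int) (tempo sinal : List Int)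
    (c0 : Nat) (base : Int),
    nrziLoop cs (j + 1) (pvLvl base c0) t tempo sinal =
      (tempo ++ (List.range cs.length).flatMap (fun k : Nat => [t + k, t + k + 1]),
       sinal ++ ((altCounts cs c0).map (pvLvl base)).flatMap (fun lvl => [lvl, lvl])) := by
  induction cs with
  | nil => intro j t tempo sinal c0 base; simp [nrziLoop, altCounts]
  | cons ch rest ih =>
    intro j t tempo sinal c0 base
    show nrziLoop (ch :: rest) (j + 1) (pvLvl base c0) t tempo sinal = _
    unfold nrziLoop
    have hstep :
        (if 0 < j + 1 ∧ ch = '1' then -(pvLvl base c0) else pvLvl base c0) =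
          pvLvl base (if ch = '1' then c0 + 1 else c0) := by
      by_cases h : ch = '1'
      · simp [h, pvLvl_succ]
      · simp [h]
    simp only [hstep]
    rw [ih (j + 1) (t + 1) (tempo ++ [t, t + 1])
        (sinal ++ [pvLvl base (if ch = '1' then c0 + 1 else c0),
                   pvLvl base (if ch = '1' then c0 + 1 else c0)])
        (if ch = '1' then c0 + 1 else c0) base]
    simp only [Prod.mk.injEq]
    constructor
    · rw [List.length_cons, range_flatMap_shift]
      simp
    · show _ = sinal ++ ((altCounts (ch :: rest) c0).map (pvLvl base)).flatMap _
      rw [altCounts_cons]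
      simp

theorem nrzi_spec_aux (bits : String) : nrzi bits = nrzi_alt bits := by
  unfold nrzi nrzi_alt
  cases h : bits.toList with
  | nil => simp
  | cons ch rest =>
    simp only [List.isEmpty_cons, Bool.false_eq_true, if_false, List.length_cons,
      Nat.add_one_ne_zero]
    set base : Int := if (ch :: rest).headD ' ' = '0' then -1 else 1 with hbase
    show nrziLoop (ch :: rest) 0 base 0 [] [] = _
    unfold nrziLoop
    have hni : (if 0 < (0 : Nat) ∧ ch = '1' then -base else base) = base := by simp
    simp only [hni, List.nil_append]
    have hloop := nrziLoop_spec rest 0 (0 + 1) [0, 0 + 1] [base, base] 0 base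
    rw [show pvLvl base 0 = base by simp [pvLvl]] at hloop
    rw [hloop]
    simp only [Prod.mk.injEq]
    constructor
    · have ht := range_flatMap_shift rest.length 0
      simp only [zero_add] at ht ⊢
      rw [ht]
    · have hf : pvLvl base = fun c : Nat => if c % 2 = 0 then base else -base := by
        funext c
        by_cases hc : c % 2 = 0 <;> simp [pvLvl, hc]
      rw [hf]
      simp

-- ===== VERDICT (by name: the statement is the Claim_ definition above) =====
theorem nrzi_spec : Claim_equal_nrzi := by
  intro bits _
  exact nrzi_spec_aux bits
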